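-- pv_equiv track=rewrite | github.com/Ricardo1335/CNYT-2020-1 | complejos.py | sumacompvector
-- ===== SOURCE A (Python) =====
-- def suma(a,b):
--     c = a[0]+b[0],a[1]+b[1]
--     return c
--
-- def sumacompvector(a):
--     if len(a) < 2 :
--         return a[0]
--     elif len(a) == 2:
--         s = suma(a[0],a[1])
--         return s
--     else:
--         s = suma(a[0],a[1])
--         for i in range (2,len(a)):
--             s = suma(s,a[i])
--         return s
-- ===== SOURCE B (Python) =====
-- def sumacompvector(a):
--     if len(a) < 2:
--         return a[0]
--     real = sum(x[0] for x in a)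
--     imag = sum(x[1] for x in a)
--     return (real, imag)
-- ===== Notes on version B (the rewrite author's own statement) =====
-- stated objective: idiomatic
-- what changed: Replaces the pairwise suma-fold with two independent component-wise sums of the real and imaginary projections via sum().
import Mathlib
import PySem

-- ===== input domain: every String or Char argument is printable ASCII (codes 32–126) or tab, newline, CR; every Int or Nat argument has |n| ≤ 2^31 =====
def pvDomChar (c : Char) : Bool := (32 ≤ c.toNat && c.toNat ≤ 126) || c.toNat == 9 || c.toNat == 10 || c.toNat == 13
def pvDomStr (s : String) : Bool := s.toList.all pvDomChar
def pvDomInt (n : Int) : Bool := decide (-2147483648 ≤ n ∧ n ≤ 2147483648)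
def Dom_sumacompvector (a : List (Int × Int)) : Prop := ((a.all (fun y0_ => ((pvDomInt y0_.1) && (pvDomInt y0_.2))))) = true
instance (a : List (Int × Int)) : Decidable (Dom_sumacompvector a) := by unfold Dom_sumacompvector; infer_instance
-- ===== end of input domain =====

-- B replaces A's pairwise suma-fold by two independent component-wise sums (idiomatic decomposition; same cost).


-- ===== PORT A =====
def suma (a b : Int × Int) : Int × Int := (a.1 + b.1, a.2 + b.2)

def sumacompvector (a : List (Int × Int)) : Int × Int :=
  if a.length < 2 then PySem.List.pyGetD a 0 (0, 0)
  else if a.length = 2 then suma (PySem.List.pyGetD a 0 (0, 0)) (PySem.List.pyGetD a 1 (0, 0))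
  else
    (PySem.List.pyRange 2 (a.length : Int) 1).foldl
      (fun s i => suma s (PySem.List.pyGetD a i (0, 0)))
      (suma (PySem.List.pyGetD a 0 (0, 0)) (PySem.List.pyGetD a 1 (0, 0)))

-- ===== PORT B =====
def sumacompvector_alt (a : List (Int × Int)) : Int × Int :=
  if a.length < 2 then PySem.List.pyGetD a 0 (0, 0)
  else ((a.map Prod.fst).sum, (a.map Prod.snd).sum)

-- ===== PRECONDITION & SPEC =====
-- Pre_ excludes only the empty list, on which both A and B raise IndexError (a[0]).
def Pre_sumacompvector (a : List (Int × Int)) : Prop := a ≠ []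
instance (a : List (Int × Int)) : Decidable (Pre_sumacompvector a) := by unfold Pre_sumacompvector; infer_instance
def pvWitness_sumacompvector : (List (Int × Int)) := [(1, 2)]

def Spec_sumacompvector (a : List (Int × Int)) (out : Int × Int) : Prop := out = sumacompvector_alt a
instance (a : List (Int × Int)) (out : Int × Int) : Decidable (Spec_sumacompvector a out) := by unfold Spec_sumacompvector; infer_instance

-- ===== CLAIM (what is proved, stated in full; the proofs are below) =====
def Claim_equal_sumacompvector : Prop := ∀ (a : List (Int × Int)), Dom_sumacompvector a → Pre_sumacompvector a → Spec_sumacompvector a (sumacompvector a)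

-- ===== LEMMAS AND PROOFS =====
theorem foldl_suma (l : List (Int × Int)) (s : Int × Int) :
    l.foldl suma s = (s.1 + (l.map Prod.fst).sum, s.2 + (l.map Prod.snd).sum) := by
  induction l generalizing s with
  | nil => simp
  | cons x t ih => simp [ih, suma]; constructor <;> ring

-- ===== VERDICT (by name: the statement is the Claim_ definition above) =====
theorem sumacompvector_spec : Claim_equal_sumacompvector := by
  intro a _ hpre
  unfold Spec_sumacompvector sumacompvector sumacompvector_alt
  match a with
  | [] => exact absurd rfl hpre
  | [x] => simp
  | x :: y :: l =>
    rcases l with _ | ⟨z, t⟩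
    · simp [PySem.List.pyGetD, PySem.List.pyGet?, PySem.List.pyIdx?, suma]
    · rw [if_neg (by simp), if_neg (by simp)]
      rw [if_neg (by simp)]
      rw [PySem.List.foldl_pyRange_pyGetD' (x :: y :: z :: t) (0,0) suma
            (suma (PySem.List.pyGetD (x :: y :: z :: t) 0 (0,0)) (PySem.List.pyGetD (x :: y :: z :: t) 1 (0,0))) (a := 2) (by norm_num)]
      rw [PySem.List.pyGetD_zero_cons, show PySem.List.pyGetD (x :: y :: z :: t) 1 (0,0) = y from
            by rw [PySem.List.pyGetD_ofNat' (x :: y :: z :: t) 1]; rfl]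
      simp [foldl_suma, suma]
      constructor <;> ring
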